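-- pv_equiv track=rewrite | github.com/ahyeon0508/Algorithm | 프로그래머스/KAKAO/code/신고 결과 받기.py | solution
-- ===== SOURCE A (Python) =====
-- def solution(id_list, report, k):
--     report_dict = {}
--     mail_dict = {}
--     for i in id_list:
--         report_dict[i] = []
--         mail_dict[i] = 0
--
--     for users in set(report):
--         i, j = users.split()
--         report_dict[j].append(i)
--
--     for key, value_list in report_dict.items():
--         if len(value_list) >= k:
--             for value in value_list:
--                 mail_dict[value] += 1
--
--     return list(mail_dict.values())
-- ===== SOURCE B (Python) =====
-- def solution(id_list, report, k):
--     # Direct per-user counting by rescanning: no report-lists or mail dicts are built.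
--     reports = list(dict.fromkeys(report))
--     targets = [r.split()[1] for r in reports]
--     return [sum(1 for r in reports
--                 if r.split()[0] == u and targets.count(r.split()[1]) >= k)
--             for u in dict.fromkeys(id_list)]
-- ===== Notes on version B (the rewrite author's own statement) =====
-- stated objective: alternative
-- what changed: B builds no dictionaries at all: instead of A's pre-seeded mail dict, reverse reporter-lists and nested increment loops, B answers each id directly by rescanning the deduplicated report list, using list.count on a targets list for the threshold test; it trades extra scans for having no mutable accumulator state.
import Mathlib
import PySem

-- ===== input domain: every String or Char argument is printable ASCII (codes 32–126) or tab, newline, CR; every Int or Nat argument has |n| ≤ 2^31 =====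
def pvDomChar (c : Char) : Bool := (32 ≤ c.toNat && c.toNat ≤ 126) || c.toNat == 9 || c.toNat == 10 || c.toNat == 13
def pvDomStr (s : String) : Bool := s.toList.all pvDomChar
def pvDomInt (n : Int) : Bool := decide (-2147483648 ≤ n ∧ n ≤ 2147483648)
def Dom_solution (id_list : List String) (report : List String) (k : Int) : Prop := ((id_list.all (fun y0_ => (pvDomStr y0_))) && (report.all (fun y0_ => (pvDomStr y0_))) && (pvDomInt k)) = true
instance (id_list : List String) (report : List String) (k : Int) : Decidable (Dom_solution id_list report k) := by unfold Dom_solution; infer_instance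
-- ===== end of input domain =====

-- B builds no dictionaries at all: it answers each id directly by rescanning the deduplicated
-- report list with an inline list-count threshold test (alternative decomposition; not faster).

-- ===== PORT A =====
def solution (id_list : List String) (report : List String) (k : Int) : List Int :=
  -- report_dict = {}; mail_dict = {}; for i in id_list: report_dict[i] = []; mail_dict[i] = 0
  let dicts := id_list.foldl
    (fun (p : PySem.Dict String (List String) × PySem.Dict String Int) i =>
      (p.1.insert i [], p.2.insert i 0))
    (PySem.Dict.empty, PySem.Dict.empty)
  -- for users in set(report): i, j = users.split(); report_dict[j].append(i)
  let rd := (PySem.Set.ofList report).foldl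
    (fun (rd : PySem.Dict String (List String)) users =>
      match PySem.Str.split₀ users with
      | [i, j] => rd.modify j [] (fun l => l ++ [i])  -- KeyError (j not a key) is excluded by Pre_
      | _ => rd)                                      -- unpacking ValueError is excluded by Pre_
    dicts.1
  -- for key, value_list in report_dict.items(): if len(value_list) >= k: for value in value_list: mail_dict[value] += 1
  let md := rd.items.foldl
    (fun (md : PySem.Dict String Int) kv =>
      if k ≤ (kv.2.length : Int) then
        kv.2.foldl (fun md v => md.modify v 0 (· + 1)) md  -- KeyError (v not a key) is excluded by Pre_
      else md)
    dicts.2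
  md.values

-- ===== PORT B =====
def solution_alt (id_list : List String) (report : List String) (k : Int) : List Int :=
  -- reports = list(dict.fromkeys(report))
  let reports := PySem.List.dedup report
  -- targets = [r.split()[1] for r in reports]
  -- (r.split()[1] / r.split()[0] raise IndexError only outside Pre_, where pyGetD is the total form)
  let targets := reports.map (fun r => PySem.List.pyGetD (PySem.Str.split₀ r) 1 "")
  -- [sum(1 for r in reports if r.split()[0] == u and targets.count(r.split()[1]) >= k)
  --  for u in dict.fromkeys(id_list)]
  (PySem.List.dedup id_list).map (fun u =>
    reports.foldl (fun (acc : Int) r =>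
      if (PySem.List.pyGetD (PySem.Str.split₀ r) 0 "" == u)
         && decide (k ≤ (targets.count (PySem.List.pyGetD (PySem.Str.split₀ r) 1 "") : Int))
      then acc + 1 else acc) 0)

-- ===== PRECONDITION & SPEC =====
-- Pre_ excludes exactly the inputs on which Python A raises: a report entry that does not split
-- into exactly two words (ValueError), a reported id absent from id_list (KeyError), or a
-- reporter absent from id_list whose reported user reaches the threshold k (KeyError).
def Pre_solution (id_list : List String) (report : List String) (k : Int) : Prop :=
  ∀ r ∈ report,
    (PySem.Str.split₀ r).length = 2 ∧
    (PySem.Str.split₀ r).getD 1 "" ∈ id_list ∧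
    ((PySem.Str.split₀ r).getD 0 "" ∈ id_list ∨
      (((PySem.List.dedup report).countP
          (fun r' => (PySem.Str.split₀ r').getD 1 "" == (PySem.Str.split₀ r).getD 1 "")) : Int) < k)
instance (id_list : List String) (report : List String) (k : Int) : Decidable (Pre_solution id_list report k) := by unfold Pre_solution; infer_instance

def pvWitness_solution : List String × List String × Int :=
  (["muzi", "frodo", "apeach", "neo"],
   ["muzi frodo", "apeach frodo", "frodo neo", "muzi neo", "apeach muzi"], 2)

def Spec_solution (id_list : List String) (report : List String) (k : Int) (out : List Int) : Prop := out = solution_alt id_list report k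
instance (id_list : List String) (report : List String) (k : Int) (out : List Int) : Decidable (Spec_solution id_list report k out) := by unfold Spec_solution; infer_instance

-- ===== CLAIM (what is proved, stated in full; the proofs are below) =====
def Claim_equal_solution : Prop := ∀ (id_list : List String) (report : List String) (k : Int), Dom_solution id_list report k → Pre_solution id_list report k → Spec_solution id_list report k (solution id_list report k)

-- ===== LEMMAS AND PROOFS =====

def pvPair? (r : String) : Option (String × String) :=
  match PySem.Str.split₀ r with
  | [a, b] => some (b, a)  -- (reported, reporter)
  | _ => none

lemma pv_getD_foldl_insert_const {ν : Type} (xs : List String) (c : ν)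
    (d : PySem.Dict String ν) (h : ∀ u, d.getD u c = c) (u : String) :
    (xs.foldl (fun d i => d.insert i c) d).getD u c = c := by
  induction xs generalizing d with
  | nil => exact h u
  | cons x t ih =>
    simp only [List.foldl_cons]
    exact ih _ (fun v => by rw [PySem.Dict.getD_insert]; split <;> simp [h])

lemma pv_loop2_eq (S : List String) (rd : PySem.Dict String (List String)) :
    S.foldl (fun rd users =>
      match PySem.Str.split₀ users with
      | [i, j] => rd.modify j [] (fun l => l ++ [i])
      | _ => rd) rd
    = (S.filterMap pvPair?).foldl (fun d p => d.modify p.1 [] (fun l => l ++ [p.2])) rd := by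
  induction S generalizing rd with
  | nil => rfl
  | cons r t ih =>
    simp only [List.foldl_cons, List.filterMap_cons]
    rcases hs : PySem.Str.split₀ r with _ | ⟨a, _ | ⟨b, _ | ⟨c, t'⟩⟩⟩ <;>
      simp [pvPair?, hs, ih]

lemma pv_foldl_count_int (P : String → Bool) (S : List String) (a : Int) :
    S.foldl (fun acc r => if P r then acc + 1 else acc) a = a + (S.countP P : Int) := by
  induction S generalizing a with
  | nil => simp
  | cons r t ih =>
    simp only [List.foldl_cons, List.countP_cons]
    by_cases h : P r = true
    · simp only [if_pos h, ih]; push_cast; ring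
    · simp only [if_neg h, ih]
      simp

lemma pv_B_countP (S : List String) (h : ∀ r ∈ S, (PySem.Str.split₀ r).length = 2)
    (Q : String → String → Bool) :
    S.countP (fun r => Q (PySem.List.pyGetD (PySem.Str.split₀ r) 0 "")
                         (PySem.List.pyGetD (PySem.Str.split₀ r) 1 ""))
    = (S.filterMap pvPair?).countP (fun p => Q p.2 p.1) := by
  induction S with
  | nil => rfl
  | cons r t ih =>
    have h2 := h r List.mem_cons_self
    have ht : ∀ r' ∈ t, (PySem.Str.split₀ r').length = 2 :=
      fun r' hr' => h r' (List.mem_cons_of_mem _ hr')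
    rcases hs : PySem.Str.split₀ r with _ | ⟨a, _ | ⟨b, _ | ⟨c, t'⟩⟩⟩ <;> rw [hs] at h2 <;>
      simp at h2
    rw [List.filterMap_cons]
    have hp : pvPair? r = some (b, a) := by simp [pvPair?, hs]
    rw [hp]
    simp only [List.countP_cons, hs]
    have e0 : PySem.List.pyGetD [a, b] (0 : Int) "" = a := rfl
    have e1 : PySem.List.pyGetD [a, b] (1 : Int) "" = b := rfl
    rw [e0, e1, ih ht]

lemma pv_loop3_getD (k : Int) (its : List (String × List String))
    (md : PySem.Dict String Int) (u : String) :
    (its.foldl (fun md kv =>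
        if k ≤ (kv.2.length : Int) then
          kv.2.foldl (fun md v => md.modify v 0 (· + 1)) md
        else md) md).getD u 0
    = md.getD u 0
      + (its.map (fun kv => if k ≤ (kv.2.length : Int) then (kv.2.count u : Int) else 0)).sum := by
  induction its generalizing md with
  | nil => simp
  | cons kv t ih =>
    simp only [List.foldl_cons, List.map_cons, List.sum_cons]
    by_cases h : k ≤ (kv.2.length : Int)
    · simp only [if_pos h, ih, PySem.Dict.getD_foldl_modify_add_one]; ring
    · simp only [if_neg h, ih]; ring

lemma pv_update_self (s : List String) (l : List String) (h : ∀ x ∈ l, x ∈ s) :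
    PySem.Set.update s l = s := by
  rw [PySem.Set.update_eq_append_filter]
  have : (PySem.Set.ofList l).filter (fun y => !PySem.Set.contains s y) = [] := by
    rw [List.filter_eq_nil_iff]
    intro y hy
    simpa using h y ((PySem.Set.mem_ofList l y).1 hy)
  rw [this, List.append_nil]

lemma pv_loop3_keys (k : Int) (its : List (String × List String))
    (md : PySem.Dict String Int)
    (h : ∀ kv ∈ its, k ≤ ((kv.2 : List String).length : Int) → ∀ v ∈ kv.2, v ∈ md.keys) :
    (its.foldl (fun md kv =>
        if k ≤ (kv.2.length : Int) then
          kv.2.foldl (fun md v => md.modify v 0 (· + 1)) md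
        else md) md).keys = md.keys := by
  induction its generalizing md with
  | nil => rfl
  | cons kv t ih =>
    simp only [List.foldl_cons]
    by_cases hk : k ≤ (kv.2.length : Int)
    · rw [if_pos hk]
      have hkeys : (kv.2.foldl (fun md v => md.modify v 0 (· + 1)) md).keys = md.keys := by
        rw [PySem.Dict.keys_foldl_modify kv.2 0 (fun _ _ => (· + 1)) md]
        exact pv_update_self _ _ (h kv (by simp) hk)
      rw [ih _ (by intro kv' h' hk' v hv; rw [hkeys]; exact h kv' (by simp [h']) hk' v hv), hkeys]
    · rw [if_neg hk]
      exact ih _ (fun kv' h' => h kv' (by simp [h']))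

lemma pv_sum_zero (x : String) (c : Int) (ids : List String) (hx : x ∉ ids) :
    (ids.map (fun b => if x = b then c else 0)).sum = 0 := by
  induction ids with
  | nil => rfl
  | cons b t ih =>
    have hxb : x ≠ b := by intro h; exact hx (h ▸ List.mem_cons_self)
    simp only [List.map_cons, List.sum_cons, if_neg hxb]
    rw [ih (fun h => hx (List.mem_cons_of_mem _ h))]
    ring

lemma pv_sum_single (x : String) (c : Int) (ids : List String) (hnd : ids.Nodup)
    (hx : x ∈ ids) :
    (ids.map (fun b => if x = b then c else 0)).sum = c := by
  induction ids with
  | nil => cases hx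
  | cons b t ih =>
    rcases List.mem_cons.1 hx with h | h
    · simp only [List.map_cons, List.sum_cons, if_pos h]
      rw [pv_sum_zero x c t (by rw [h] at *; exact (List.nodup_cons.1 hnd).1)]
      ring
    · have hxb : x ≠ b := by
        intro he; exact (List.nodup_cons.1 hnd).1 (he ▸ h)
      simp only [List.map_cons, List.sum_cons, if_neg hxb]
      rw [ih (List.nodup_cons.1 hnd).2 h]
      ring

lemma pv_partition (ids : List String) (hnd : ids.Nodup) (u : String) (K : String → Bool)
    (P : List (String × String)) (hmem : ∀ p ∈ P, p.1 ∈ ids) :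
    (ids.map (fun b =>
        if K b then (P.countP (fun p => p.2 == u && p.1 == b) : Int) else 0)).sum
    = (P.countP (fun p => p.2 == u && K p.1) : Int) := by
  induction P with
  | nil => simp
  | cons p t ih =>
    have hpt : ∀ q ∈ t, q.1 ∈ ids := fun q hq => hmem q (List.mem_cons_of_mem _ hq)
    have hp1 : p.1 ∈ ids := hmem p List.mem_cons_self
    simp only [List.countP_cons]
    have hmap : ids.map (fun b =>
          if K b then ((t.countP (fun q => q.2 == u && q.1 == b)
            + if (p.2 == u && p.1 == b) = true then 1 else 0 : Nat) : Int) else 0)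
        = ids.map (fun b =>
          (if K b then (t.countP (fun q => q.2 == u && q.1 == b) : Int) else 0)
          + (if p.1 = b then (if (p.2 == u && K p.1) = true then (1:Int) else 0) else 0)) := by
      apply List.map_congr_left
      intro b _
      by_cases hb : p.1 = b
      · subst hb
        by_cases hK : K p.1 = true <;> by_cases hu : (p.2 == u) = true <;>
          simp [hK, hu]
      · have : (p.1 == b) = false := by simp [hb]
        simp [this, hb]
    rw [hmap, PySem.List.sum_map_add_int, ih hpt,
        pv_sum_single p.1 _ ids hnd hp1]
    by_cases hc : (p.2 == u && K p.1) = true <;> simp [hc]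

lemma pv_countP_pairs (S : List String)
    (h : ∀ r ∈ S, (PySem.Str.split₀ r).length = 2) (j : String) :
    S.countP (fun r' => (PySem.Str.split₀ r').getD 1 "" == j)
    = (S.filterMap pvPair?).countP (fun q => q.1 == j) := by
  induction S with
  | nil => rfl
  | cons r t ih =>
    have h2 := h r List.mem_cons_self
    have ht : ∀ r' ∈ t, (PySem.Str.split₀ r').length = 2 :=
      fun r' hr' => h r' (List.mem_cons_of_mem _ hr')
    rcases hs : PySem.Str.split₀ r with _ | ⟨a, _ | ⟨b, _ | ⟨c, t'⟩⟩⟩ <;>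
      rw [hs] at h2 <;> simp at h2
    rw [List.filterMap_cons]
    have hp : pvPair? r = some (b, a) := by simp [pvPair?, hs]
    rw [hp]
    simp only [List.countP_cons, hs, List.getD_cons_succ, List.getD_cons_zero]
    rw [ih ht]

lemma pv_pair?_some (r : String) (p : String × String) (h : pvPair? r = some p) :
    PySem.Str.split₀ r = [p.2, p.1] := by
  unfold pvPair? at h
  rcases hs : PySem.Str.split₀ r with _ | ⟨a, _ | ⟨b, _ | ⟨c, t'⟩⟩⟩ <;> rw [hs] at h
  · exact absurd h (by simp)
  · exact absurd h (by simp)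
  · have hp := Option.some.inj h
    subst hp
    rfl
  · exact absurd h (by simp)

def pvP (report : List String) : List (String × String) :=
  (PySem.Set.ofList report).filterMap pvPair?
def pvReps (report : List String) (b : String) : List String :=
  ((pvP report).filter (fun p => p.1 == b)).map (fun p => p.2)
def pvCnt (report : List String) (b : String) : Nat :=
  (pvP report).countP (fun q => q.1 == b)

lemma pv_A_eq (id_list report : List String) (k : Int)
    (h1 : ∀ p ∈ pvP report, p.1 ∈ PySem.List.dedup id_list)
    (h2 : ∀ p ∈ pvP report, k ≤ (pvCnt report p.1 : Int) → p.2 ∈ PySem.List.dedup id_list) :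
    solution id_list report k
    = (PySem.List.dedup id_list).map (fun u =>
        ((PySem.List.dedup id_list).map (fun b =>
          if k ≤ ((pvReps report b).length : Int)
          then ((pvReps report b).count u : Int) else 0)).sum) := by
  unfold solution
  dsimp only
  rw [PySem.List.foldl_prod_mk (fun d i => d.insert i ([] : List String))
        (fun d i => d.insert i (0 : Int)) id_list PySem.Dict.empty PySem.Dict.empty]
  rw [pv_loop2_eq]
  dsimp only
  rw [show List.filterMap pvPair? (PySem.Set.ofList report) = pvP report from rfl]
  set rd0 := List.foldl (fun (d : PySem.Dict String (List String)) i => d.insert i []) PySem.Dict.empty id_list with hrd0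
  set md0 := List.foldl (fun (d : PySem.Dict String Int) i => d.insert i 0) PySem.Dict.empty id_list with hmd0
  set rd1 := List.foldl (fun (d : PySem.Dict String (List String)) p => d.modify p.1 [] fun l => l ++ [p.2]) rd0 (pvP report) with hrd1
  have hkeys_rd0 : rd0.keys = PySem.List.dedup id_list := by
    rw [hrd0, PySem.Dict.keys_foldl_insert id_list (fun _ _ => ([]:List String)) PySem.Dict.empty,
        PySem.Dict.keys_empty, PySem.Set.update_nil_left, ← PySem.List.dedup_eq_ofList]
  have hkeys_md0 : md0.keys = PySem.List.dedup id_list := by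
    rw [hmd0, PySem.Dict.keys_foldl_insert id_list (fun _ _ => (0:Int)) PySem.Dict.empty,
        PySem.Dict.keys_empty, PySem.Set.update_nil_left, ← PySem.List.dedup_eq_ofList]
  have hkeys_rd1 : rd1.keys = PySem.List.dedup id_list := by
    rw [hrd1, PySem.Dict.keys_foldl_modify_key (pvP report) (fun p => p.1) [] (fun _ p => fun l => l ++ [p.2]) rd0,
        hkeys_rd0]
    apply pv_update_self
    intro x hx
    obtain ⟨p, hp, rfl⟩ := List.mem_map.1 hx
    exact h1 p hp
  have hgetD_rd1 : ∀ b, rd1.getD b [] = pvReps report b := by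
    intro b
    rw [hrd1, PySem.Dict.getD_foldl_modify_append (pvP report) rd0 b, hrd0,
        pv_getD_foldl_insert_const id_list [] PySem.Dict.empty (fun u => PySem.Dict.getD_empty u []) b]
    unfold pvReps
    rw [List.nil_append]
  have hitems : rd1.items = (PySem.List.dedup id_list).map (fun b => (b, pvReps report b)) := by
    rw [PySem.Dict.items_eq_map_keys rd1 (by rw [hkeys_rd1]; exact PySem.List.nodup_dedup id_list) [],
        hkeys_rd1]
    exact List.map_congr_left (fun b _ => by rw [hgetD_rd1 b])
  have hlenreps : ∀ b, (pvReps report b).length = pvCnt report b := by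
    intro b
    unfold pvReps pvCnt
    rw [List.length_map]
    exact List.countP_eq_length_filter.symm
  have hrep_mem : ∀ kv ∈ rd1.items, k ≤ ((kv.2 : List String).length : Int) →
      ∀ v ∈ kv.2, v ∈ md0.keys := by
    intro kv hkv hk v hv
    rw [hitems] at hkv
    obtain ⟨b, hb, rfl⟩ := List.mem_map.1 hkv
    obtain ⟨p, hpf, rfl⟩ := List.mem_map.1 hv
    have hpP := (List.mem_filter.1 hpf).1
    have hb1 : p.1 = b := by simpa using (List.mem_filter.1 hpf).2
    rw [hkeys_md0]
    apply h2 p hpP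
    rw [hb1, ← hlenreps b]
    exact hk
  have hkeys_md1 : (List.foldl
      (fun md kv => if k ≤ ((kv.2 : List String).length : Int) then
        kv.2.foldl (fun md v => md.modify v 0 (· + 1)) md else md) md0 rd1.items).keys
      = PySem.List.dedup id_list := by
    rw [pv_loop3_keys k rd1.items md0 hrep_mem, hkeys_md0]
  rw [PySem.Dict.values_eq_map_keys _ (by rw [hkeys_md1]; exact PySem.List.nodup_dedup id_list) 0,
      hkeys_md1]
  apply List.map_congr_left
  intro u _
  rw [pv_loop3_getD k rd1.items md0 u, hmd0,
      pv_getD_foldl_insert_const id_list 0 PySem.Dict.empty (fun v => PySem.Dict.getD_empty v 0) u,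
      hitems, List.map_map, zero_add]
  apply congrArg
  apply List.map_congr_left
  intro b _
  simp only [Function.comp]

lemma pv_B_eq (id_list report : List String) (k : Int)
    (hlen2 : ∀ r ∈ PySem.Set.ofList report, (PySem.Str.split₀ r).length = 2) :
    solution_alt id_list report k
    = (PySem.List.dedup id_list).map (fun u =>
        ((pvP report).countP
          (fun p => p.2 == u && decide (k ≤ (pvCnt report p.1 : Int))) : Int)) := by
  unfold solution_alt
  dsimp only
  rw [PySem.List.dedup_eq_ofList report]
  have hT : ∀ y, ((PySem.Set.ofList report).map
      (fun r => PySem.List.pyGetD (PySem.Str.split₀ r) 1 "")).count y = pvCnt report y := by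
    intro y
    rw [List.count_eq_countP, List.countP_map]
    have := pv_B_countP (PySem.Set.ofList report) hlen2 (fun _ t => t == y)
    simpa [Function.comp_def] using this
  apply List.map_congr_left
  intro u _
  rw [pv_foldl_count_int, zero_add]
  apply congrArg
  simp only [hT]
  exact pv_B_countP (PySem.Set.ofList report) hlen2
    (fun x t => x == u && decide (k ≤ (pvCnt report t : Int)))

theorem pv_main (id_list : List String) (report : List String) (k : Int)
    (hpre : Pre_solution id_list report k) :
    solution id_list report k = solution_alt id_list report k := by
  have hnd := PySem.List.nodup_dedup id_list
  have hlen2 : ∀ r ∈ PySem.Set.ofList report, (PySem.Str.split₀ r).length = 2 := by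
    intro r hr
    exact (hpre r ((PySem.Set.mem_ofList report r).1 hr)).1
  have hsplit : ∀ p ∈ pvP report, ∃ r ∈ report, PySem.Str.split₀ r = [p.2, p.1] := by
    intro p hp
    obtain ⟨r, hr, hpr⟩ := List.mem_filterMap.1 hp
    exact ⟨r, (PySem.Set.mem_ofList report r).1 hr, pv_pair?_some r p hpr⟩
  have h1 : ∀ p ∈ pvP report, p.1 ∈ PySem.List.dedup id_list := by
    intro p hp
    obtain ⟨r, hr, hs⟩ := hsplit p hp
    have h := (hpre r hr).2.1
    rw [hs] at h
    simp only [List.getD_cons_succ, List.getD_cons_zero] at h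
    exact (PySem.List.mem_dedup _ _).2 h
  have h2 : ∀ p ∈ pvP report, k ≤ (pvCnt report p.1 : Int) → p.2 ∈ PySem.List.dedup id_list := by
    intro p hp hk
    obtain ⟨r, hr, hs⟩ := hsplit p hp
    have h := (hpre r hr).2.2
    rw [hs] at h
    simp only [List.getD_cons_succ, List.getD_cons_zero] at h
    rcases h with h | h
    · exact (PySem.List.mem_dedup _ _).2 h
    · exfalso
      rw [PySem.List.dedup_eq_ofList, pv_countP_pairs _ hlen2 p.1] at h
      unfold pvCnt at hk
      rw [show List.filterMap pvPair? (PySem.Set.ofList report) = pvP report from rfl] at h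
      omega
  rw [pv_A_eq id_list report k h1 h2, pv_B_eq id_list report k hlen2]
  apply List.map_congr_left
  intro u _
  rw [show (PySem.List.dedup id_list).map (fun b =>
        if k ≤ ((pvReps report b).length : Int) then ((pvReps report b).count u : Int) else 0)
      = (PySem.List.dedup id_list).map (fun b =>
        if (decide (k ≤ (pvCnt report b : Int))) = true
        then ((pvP report).countP (fun p => p.2 == u && p.1 == b) : Int) else 0) from
    List.map_congr_left (fun b _ => by
      have hlen : (pvReps report b).length = pvCnt report b := by
        unfold pvReps pvCnt
        rw [List.length_map]
        exact List.countP_eq_length_filter.symm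
      have hcnt : (pvReps report b).count u
          = (pvP report).countP (fun p => p.2 == u && p.1 == b) := by
        unfold pvReps
        simp [List.count_eq_countP, List.countP_map, List.countP_filter, Function.comp_def]
      rw [hlen, hcnt]
      by_cases hkb : k ≤ (pvCnt report b : Int) <;> simp [hkb])]
  exact pv_partition (PySem.List.dedup id_list) hnd u
    (fun b => decide (k ≤ (pvCnt report b : Int))) (pvP report) h1

-- ===== VERDICT (by name: the statement is the Claim_ definition above) =====
theorem solution_spec : Claim_equal_solution := by
  intro id_list report k _ hpre
  unfold Spec_solution
  exact pv_main id_list report k hpre
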